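-- pv_equiv track=rewrite | github.com/simeonthefirst/SankeyFromExcel | main.py | extended_labels
-- ===== SOURCE A (Python) =====
-- def extended_labels(labels: list[str], source: list[int], target: list[int], values: list[int]) -> list[str]:
--
--     labels_ex = []
--
--     for i, label in enumerate(labels):
--         # sum out
--         total_out = sum(values[idx]
--                         for idx, src in enumerate(source) if src == i)
--
--         # sum in
--         total_in = sum(values[idx]
--                        for idx, tgt in enumerate(target) if tgt == i)
--
--         total = max(total_out, total_in)
--
--         labels_ex.append(f"{label} \n{total}€")
--
--     return labels_ex
-- ===== SOURCE B (Python) =====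
-- def extended_labels(labels: list[str], source: list[int], target: list[int], values: list[int]) -> list[str]:
--     n = len(labels)
--     tot_out = [0] * n
--     tot_in = [0] * n
--     for s, v in zip(source, values):
--         if 0 <= s < n:
--             tot_out[s] += v
--     for t, v in zip(target, values):
--         if 0 <= t < n:
--             tot_in[t] += v
--     return [f"{lab} \n{max(o, i)}€" for lab, o, i in zip(labels, tot_out, tot_in)]
-- ===== Notes on version B (the rewrite author's own statement) =====
-- stated objective: faster
-- what changed: Replaces the per-label rescans of source/target (O(L*E)) by one pass over zip(source, values) and zip(target, values) accumulating per-index totals into two arrays, then formats labels in a single comprehension.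
import Mathlib
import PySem

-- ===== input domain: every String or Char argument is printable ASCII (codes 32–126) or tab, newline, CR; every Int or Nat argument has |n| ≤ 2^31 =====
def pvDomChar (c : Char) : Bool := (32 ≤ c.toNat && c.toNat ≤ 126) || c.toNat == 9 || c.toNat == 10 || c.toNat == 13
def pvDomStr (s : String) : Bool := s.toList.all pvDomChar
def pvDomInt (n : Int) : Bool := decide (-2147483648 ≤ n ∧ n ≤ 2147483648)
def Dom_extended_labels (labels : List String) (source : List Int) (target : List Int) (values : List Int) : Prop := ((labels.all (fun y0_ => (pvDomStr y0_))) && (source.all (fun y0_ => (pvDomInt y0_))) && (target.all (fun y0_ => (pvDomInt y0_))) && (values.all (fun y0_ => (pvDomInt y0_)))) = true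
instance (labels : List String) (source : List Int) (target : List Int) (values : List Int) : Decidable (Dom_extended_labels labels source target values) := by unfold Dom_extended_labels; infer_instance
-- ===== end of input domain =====

-- B replaces A's per-label rescans of source/target by one accumulation pass over
-- zip(source, values) into two per-index total arrays: O(L+E) instead of O(L*E).

-- ===== PORT A =====
-- sum(values[idx] for idx, src in enumerate(lst) if src == i)
def pvFlowSum (lst : List Int) (values : List Int) (i : Int) : Int :=
  (PySem.List.enumerate lst).foldl
    (fun acc q => if q.2 = i then acc + PySem.List.pyGetD values q.1 0 else acc) 0

def extended_labels (labels : List String) (source : List Int) (target : List Int) (values : List Int) : List String :=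
  (PySem.List.enumerate labels).foldl
    (fun labels_ex p =>
      let total_out := pvFlowSum source values p.1
      let total_in := pvFlowSum target values p.1
      let total := max total_out total_in
      labels_ex ++ [p.2 ++ " \n" ++ PySem.Int.toStr total ++ "€"]) []

-- ===== PORT B =====
-- the accumulation pass: for s, v in zip(lst, values): if 0 <= s < n: tot[s] += v
def pvAccumFlow (n : Nat) (lst : List Int) (values : List Int) : List Int :=
  (lst.zip values).foldl
    (fun tot p =>
      if 0 ≤ p.1 ∧ p.1 < (n : Int) then tot.set p.1.toNat (tot.getD p.1.toNat 0 + p.2) else tot)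
    (List.replicate n 0)

def extended_labels_alt (labels : List String) (source : List Int) (target : List Int) (values : List Int) : List String :=
  let n := labels.length
  let totOut := pvAccumFlow n source values
  let totIn := pvAccumFlow n target values
  (labels.zip (totOut.zip totIn)).map
    (fun p => p.1 ++ " \n" ++ PySem.Int.toStr (max p.2.1 p.2.2) ++ "€")

-- ===== PRECONDITION & SPEC =====
-- Pre_ excludes exactly the inputs where A raises IndexError: a position ≥ len(values)
-- of source or target holding a valid label index makes A evaluate values[idx] out of range.
def Pre_extended_labels (labels : List String) (source : List Int) (target : List Int) (values : List Int) : Prop :=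
  (((source.drop values.length).all (fun s => !(decide (0 ≤ s) && decide (s < (labels.length : Int))))) &&
   ((target.drop values.length).all (fun t => !(decide (0 ≤ t) && decide (t < (labels.length : Int)))))) = true

instance (labels : List String) (source : List Int) (target : List Int) (values : List Int) : Decidable (Pre_extended_labels labels source target values) := by unfold Pre_extended_labels; infer_instance

def pvWitness_extended_labels : List String × List Int × List Int × List Int :=
  (["a", "b"], [0, 1, 0], [1, 1, -1], [3, 4, 5])

def Spec_extended_labels (labels : List String) (source : List Int) (target : List Int) (values : List Int) (out : List String) : Prop := out = extended_labels_alt labels source target values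
instance (labels : List String) (source : List Int) (target : List Int) (values : List Int) (out : List String) : Decidable (Spec_extended_labels labels source target values out) := by unfold Spec_extended_labels; infer_instance

-- ===== CLAIM (what is proved, stated in full; the proofs are below) =====
def Claim_equal_extended_labels : Prop := ∀ (labels : List String) (source : List Int) (target : List Int) (values : List Int), Dom_extended_labels labels source target values → Pre_extended_labels labels source target values → Spec_extended_labels labels source target values (extended_labels labels source target values)


-- ===== LEMMAS AND PROOFS =====

-- contribution of the pair list to index i
def pvZSum (i : Int) (L : List (Int × Int)) : Int :=
  (L.map (fun p => if p.1 = i then p.2 else 0)).sum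

theorem pvAccum_length (n : Nat) (L : List (Int × Int)) (tot : List Int) :
    (L.foldl (fun tot p => if 0 ≤ p.1 ∧ p.1 < (n : Int) then tot.set p.1.toNat (tot.getD p.1.toNat 0 + p.2) else tot) tot).length = tot.length := by
  induction L generalizing tot with
  | nil => rfl
  | cons p L ih =>
      simp only [List.foldl_cons]
      split_ifs with h
      · rw [ih]; simp
      · exact ih tot

theorem pvAccum_getD (n : Nat) (L : List (Int × Int)) (tot : List Int) (k : Nat)
    (hlen : tot.length = n) (hk : k < n) :
    (L.foldl (fun tot p => if 0 ≤ p.1 ∧ p.1 < (n : Int) then tot.set p.1.toNat (tot.getD p.1.toNat 0 + p.2) else tot) tot).getD k 0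
      = tot.getD k 0 + pvZSum (k : Int) L := by
  induction L generalizing tot with
  | nil => simp [pvZSum]
  | cons p L ih =>
      simp only [List.foldl_cons]
      split_ifs with h
      · rw [ih _ (by simp [hlen])]
        rw [List.getD_eq_getElem?_getD, List.getElem?_set]
        by_cases hk' : p.1 = (k : Int)
        · have ht : p.1.toNat = k := by omega
          simp only [ht, if_pos (show k < tot.length by omega)]
          simp [pvZSum, hk', List.getD_eq_getElem?_getD]
          ring
        · have ht : p.1.toNat ≠ k := by omega
          rw [if_neg ht, ← List.getD_eq_getElem?_getD]
          simp [pvZSum, hk']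
      · rw [ih _ hlen]
        have hne : p.1 ≠ (k : Int) := by omega
        simp [pvZSum, hne]

-- A's rescan sum over lst equals the contribution sum over zip(lst, values), under the
-- guarantee that entries of lst at positions ≥ len(values) never equal i (0 ≤ i).
theorem pvFlowSum_eq_zsum (lst values : List Int) (i : Int) (s : Nat) (a : Int)
    (hi : 0 ≤ i)
    (hpre : ∀ k, (hk : k < lst.length) → values.length ≤ s + k → lst[k] ≠ i) :
    (PySem.List.enumerate lst (s : Int)).foldl
        (fun acc q => if q.2 = i then acc + PySem.List.pyGetD values q.1 0 else acc) a
      = a + pvZSum i (lst.zip (values.drop s)) := by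
  induction lst generalizing s a with
  | nil => simp [pvZSum]
  | cons x xs ih =>
      rw [PySem.List.enumerate_cons]
      simp only [List.foldl_cons]
      have hcast : ((s : Int) + 1) = ((s + 1 : Nat) : Int) := by push_cast; ring
      have htail : ∀ k, (hk : k < xs.length) → values.length ≤ (s + 1) + k → xs[k] ≠ i := by
        intro k hk hv
        have := hpre (k + 1) (by simp; omega) (by omega)
        simpa using this
      by_cases hx : x = i
      · have hs : s < values.length := by
          by_contra hge
          exact hpre 0 (by simp) (by omega) (by simpa using hx)
        have hdrop : values.drop s = values[s] :: values.drop (s + 1) :=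
          List.drop_eq_getElem_cons hs
        simp only [hx]
        rw [hcast, ih _ _ htail, PySem.List.pyGetD_natCast, hdrop]
        unfold pvZSum
        simp only [List.zip_cons_cons, List.map_cons, List.sum_cons]
        rw [List.getD_eq_getElem?_getD, List.getElem?_eq_getElem hs]
        simp only [Option.getD_some, if_true]
        ring
      · simp only [if_neg hx]
        rw [hcast, ih _ _ htail]
        rcases Nat.lt_or_ge s values.length with hs | hs
        · rw [List.drop_eq_getElem_cons hs]
          unfold pvZSum
          simp only [List.zip_cons_cons, List.map_cons, List.sum_cons, if_neg hx]
          ring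
        · rw [List.drop_eq_nil_of_le hs, List.drop_eq_nil_of_le (by omega)]
          simp [pvZSum]

theorem pvAccumFlow_length (n : Nat) (lst values : List Int) :
    (pvAccumFlow n lst values).length = n := by
  unfold pvAccumFlow; rw [pvAccum_length]; simp

-- the two output lists agree element by element
theorem extended_labels_eq (labels : List String) (source target values : List Int)
    (hpre : Pre_extended_labels labels source target values) :
    extended_labels labels source target values = extended_labels_alt labels source target values := by
  unfold extended_labels extended_labels_alt
  rw [PySem.List.foldl_append_singleton_eq_map, List.nil_append]
  have hOutLen := pvAccumFlow_length labels.length source values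
  have hInLen := pvAccumFlow_length labels.length target values
  unfold Pre_extended_labels at hpre
  simp only [Bool.and_eq_true, List.all_eq_true] at hpre
  obtain ⟨hsrc, htgt⟩ := hpre
  apply List.ext_getElem
  · simp [PySem.List.length_enumerate, hOutLen, hInLen]
  · intro k h1 h2
    have hk : k < labels.length := by
      simpa [PySem.List.length_enumerate] using h1
    rw [List.getElem_map, List.getElem_map, PySem.List.getElem_enumerate,
        List.getElem_zip, List.getElem_zip]
    simp only [Int.zero_add]
    -- reduce both totals to pvZSum
    have hside : ∀ lst : List Int,
        (∀ x ∈ lst.drop values.length, (!(decide (0 ≤ x) && decide (x < (labels.length : Int)))) = true) →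
        (hl : (pvAccumFlow labels.length lst values).length = labels.length) →
        pvFlowSum lst values (k : Int) = (pvAccumFlow labels.length lst values)[k]'(by omega) := by
      intro lst hpre hl
      have hpre' : ∀ j, (hj : j < lst.length) → values.length ≤ 0 + j → lst[j] ≠ (k : Int) := by
        intro j hj hv
        have hj2 : j - values.length < (List.drop values.length lst).length := by
          simp; omega
        have hmem := List.getElem_mem hj2
        rw [List.getElem_drop] at hmem
        have heq : values.length + (j - values.length) = j := by omega
        have hmem' : lst[j] ∈ List.drop values.length lst := by
          simpa [heq] using hmem
        have := hpre _ hmem'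
        simp only [Bool.not_eq_true', Bool.and_eq_false_iff, decide_eq_false_iff_not] at this
        intro hEq
        rcases this with h | h
        · omega
        · rw [hEq] at h; omega
      have h1 : pvFlowSum lst values (k : Int) = 0 + pvZSum (k : Int) (lst.zip (values.drop 0)) := by
        unfold pvFlowSum
        have := pvFlowSum_eq_zsum lst values (k : Int) 0 0 (by omega) hpre'
        simpa using this
      have h2 : (pvAccumFlow labels.length lst values).getD k 0
          = (List.replicate labels.length (0 : Int)).getD k 0 + pvZSum (k : Int) (lst.zip values) := by
        unfold pvAccumFlow
        exact pvAccum_getD labels.length (lst.zip values) _ k (by simp) hk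
      have hg : (pvAccumFlow labels.length lst values)[k]'(by omega)
          = (pvAccumFlow labels.length lst values).getD k 0 := by
        rw [List.getD_eq_getElem?_getD, List.getElem?_eq_getElem (by omega), Option.getD_some]
      rw [h1, List.drop_zero, hg, h2, List.getD_replicate _ hk]
    rw [hside source hsrc hOutLen, hside target htgt hInLen]

-- ===== VERDICT (by name: the statement is the Claim_ definition above) =====
theorem extended_labels_spec : Claim_equal_extended_labels := by
  intro labels source target values _ hpre
  unfold Spec_extended_labels
  exact extended_labels_eq labels source target values hpre
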